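-- pv_equiv track=rewrite | github.com/jeonghani/Algorithm | 프로그래머스/1/133499. 옹알이 （2）/옹알이 （2）.py | solution
-- ===== SOURCE A (Python) =====
-- def solution(babbling):
--     answer = 0
--     valid = ['aya', 'ye', 'woo', 'ma']
--
--     for word in babbling:
--         prev = ''
--         is_valid = True
--
--         while word:
--             found = False
--             for sound in valid:
--                 if word.startswith(sound):
--                     if sound == prev:
--                         is_valid = False
--                         break
--                     prev = sound
--                     word = word[len(sound):]
--                     found = True
--                     break
--             if not found:
--                 is_valid = False
--                 break
--
--         if is_valid:
--             answer+=1
--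
--     return answer
-- ===== SOURCE B (Python) =====
-- def solution(babbling):
--     first = {'a': 'aya', 'y': 'ye', 'w': 'woo', 'm': 'ma'}
--     answer = 0
--     for word in babbling:
--         tokens = []
--         i = 0
--         ok = True
--         while i < len(word):
--             s = first.get(word[i])
--             if s is None or word[i:i + len(s)] != s:
--                 ok = False
--                 break
--             tokens.append(s)
--             i += len(s)
--         if ok and all(a != b for a, b in zip(tokens, tokens[1:])):
--             answer += 1
--     return answer
-- ===== Notes on version B (the rewrite author's own statement) =====
-- stated objective: alternative
-- what changed: Replaces A's stateful scan (four startswith probes per step, prev tracked and checked inline, early break on repeat) with a first-letter dict lookup that tokenizes each word in one deterministic pass, then a separate zip-based adjacent-pair check for repeats.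
import Mathlib
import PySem

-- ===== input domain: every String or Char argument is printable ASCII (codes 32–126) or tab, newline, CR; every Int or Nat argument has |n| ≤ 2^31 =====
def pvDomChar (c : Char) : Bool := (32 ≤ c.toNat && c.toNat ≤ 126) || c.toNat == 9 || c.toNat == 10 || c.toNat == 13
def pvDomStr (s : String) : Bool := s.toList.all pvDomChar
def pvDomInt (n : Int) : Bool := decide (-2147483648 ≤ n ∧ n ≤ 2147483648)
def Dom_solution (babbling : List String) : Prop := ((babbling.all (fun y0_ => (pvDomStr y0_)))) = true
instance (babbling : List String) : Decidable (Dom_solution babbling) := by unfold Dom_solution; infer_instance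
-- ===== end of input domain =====

-- B replaces A's four-way prefix scan per step with a first-letter dict lookup, tokenizes
-- the whole word first, then checks adjacent tokens for repeats (objective: alternative).

-- ===== PORT A =====
-- valid = ['aya', 'ye', 'woo', 'ma']
def pvValid : List (List Char) := [['a','y','a'], ['y','e'], ['w','o','o'], ['m','a']]

-- A's while loop; find? is A's inner for-loop (first sound word startswith, with break);
-- none is the 'not found' branch, 'sound == prev' ends with is_valid = False.
def aWhile (word : List Char) (prev : List Char) : Bool :=
  if hw : word = [] then true
  else
    match hf : pvValid.find? (fun s => s.isPrefixOf word) with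
    | none => false
    | some s =>
      if s = prev then false
      else aWhile (word.drop s.length) s
termination_by word.length
decreasing_by
  have hmem := List.mem_of_find?_eq_some hf
  have hlen : 0 < s.length := by
    simp only [pvValid, List.mem_cons, List.not_mem_nil, or_false] at hmem
    rcases hmem with h | h | h | h <;> subst h <;> decide
  have hw0 : 0 < word.length := by
    cases word with
    | nil => exact absurd rfl hw
    | cons a l => simp
  simp only [List.length_drop]
  omega

def solution (babbling : List String) : Int :=
  babbling.foldl (fun answer word => if aWhile word.toList [] then answer + 1 else answer) 0

-- ===== PORT B =====
-- first = {'a': 'aya', 'y': 'ye', 'w': 'woo', 'm': 'ma'}; first.get(word[i])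
def firstGet (c : Char) : Option (List Char) :=
  if c = 'a' then some ['a','y','a']
  else if c = 'y' then some ['y','e']
  else if c = 'w' then some ['w','o','o']
  else if c = 'm' then some ['m','a']
  else none

-- B's tokenizing while loop: None / slice mismatch = 'ok = False', else append and advance
def bTok (word : List Char) : Option (List (List Char)) :=
  match word with
  | [] => some []
  | c :: rest =>
    match hf : firstGet c with
    | none => none
    | some s =>
      if s.isPrefixOf (c :: rest) then
        (bTok ((c :: rest).drop s.length)).map (fun ts => s :: ts)
      else none
termination_by word.length
decreasing_by
  have hlen : 0 < s.length := by
    simp only [firstGet] at hf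
    split_ifs at hf <;> simp_all <;> subst hf <;> decide
  simp only [List.length_drop, List.length_cons]
  omega

-- all(a != b for a, b in zip(tokens, tokens[1:]))
def bAdjOK (ts : List (List Char)) : Bool :=
  (ts.zip ts.tail).all (fun p => p.1 ≠ p.2)

def solution_alt (babbling : List String) : Int :=
  babbling.foldl
    (fun answer word =>
      match bTok word.toList with
      | none => answer
      | some ts => if bAdjOK ts then answer + 1 else answer)
    0

-- ===== PRECONDITION & SPEC =====
def Spec_solution (babbling : List String) (out : Int) : Prop := out = solution_alt babbling
instance (babbling : List String) (out : Int) : Decidable (Spec_solution babbling out) := by unfold Spec_solution; infer_instance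

-- ===== CLAIM (what is proved, stated in full; the proofs are below) =====
def Claim_equal_solution : Prop := ∀ (babbling : List String), Dom_solution babbling → Spec_solution babbling (solution babbling)

-- ===== LEMMAS AND PROOFS =====

-- 'no repeat starting after prev': what A's while loop computes on the token stream
def okFrom (prev : List Char) : List (List Char) → Bool
  | [] => true
  | s :: rest => if s = prev then false else okFrom s rest

lemma aWhile_nil (prev : List Char) : aWhile [] prev = true := by
  rw [aWhile]; simp

lemma aWhile_cons (c : Char) (rest prev : List Char) :
    aWhile (c :: rest) prev =
      match pvValid.find? (fun s => s.isPrefixOf (c :: rest)) with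
      | none => false
      | some s => if s = prev then false else aWhile ((c :: rest).drop s.length) s := by
  rw [aWhile]
  cases hg : pvValid.find? (fun s => s.isPrefixOf (c :: rest)) <;> simp [hg]

lemma bTok_cons (c : Char) (rest : List Char) :
    bTok (c :: rest) =
      match firstGet c with
      | none => none
      | some s =>
        if s.isPrefixOf (c :: rest) then
          (bTok ((c :: rest).drop s.length)).map (fun ts => s :: ts)
        else none := by
  rw [bTok]
  cases hg : firstGet c <;> simp [hg]

-- A's first-match scan over the four sounds = B's first-letter lookup (first letters are distinct)
lemma find?_eq_firstGet (c : Char) (rest : List Char) :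
    pvValid.find? (fun s => s.isPrefixOf (c :: rest)) =
      match firstGet c with
      | none => none
      | some s => if s.isPrefixOf (c :: rest) then some s else none := by
  by_cases ha : c = 'a'
  · subst ha
    cases hp : List.isPrefixOf ['y','a'] rest <;>
      simp [pvValid, firstGet, List.find?, List.isPrefixOf, hp]
  · by_cases hy : c = 'y'
    · subst hy
      cases hp : List.isPrefixOf ['e'] rest <;>
        simp [pvValid, firstGet, List.find?, List.isPrefixOf, hp]
    · by_cases hw : c = 'w'
      · subst hw
        cases hp : List.isPrefixOf ['o','o'] rest <;>
          simp [pvValid, firstGet, List.find?, List.isPrefixOf, hp]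
      · by_cases hm : c = 'm'
        · subst hm
          cases hp : List.isPrefixOf ['a'] rest <;>
            simp [pvValid, firstGet, List.find?, List.isPrefixOf, hp]
        · have ha' : ('a' == c) = false := by simp; exact fun h => ha h.symm
          have hy' : ('y' == c) = false := by simp; exact fun h => hy h.symm
          have hw' : ('w' == c) = false := by simp; exact fun h => hw h.symm
          have hm' : ('m' == c) = false := by simp; exact fun h => hm h.symm
          simp [pvValid, firstGet, List.find?, List.isPrefixOf, ha, hy, hw, hm, ha', hy', hw', hm']

lemma firstGet_pos {c : Char} {s : List Char} (hg : firstGet c = some s) : 0 < s.length := by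
  simp only [firstGet] at hg
  split_ifs at hg <;> simp_all <;> subst hg <;> decide

lemma firstGet_ne_nil {c : Char} {s : List Char} (hg : firstGet c = some s) : s ≠ [] := by
  have := firstGet_pos hg
  cases s with
  | nil => simp at this
  | cons a l => simp

-- the core agreement: A's stateful scan = B's tokenization judged by okFrom
lemma aWhile_eq_bTok (n : Nat) : ∀ (word prev : List Char), word.length ≤ n →
    aWhile word prev = (match bTok word with
      | none => false
      | some ts => okFrom prev ts) := by
  induction n with
  | zero =>
    intro word prev hlen
    have : word = [] := by cases word <;> simp_all
    subst this
    simp [aWhile_nil, bTok, okFrom]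
  | succ n ih =>
    intro word prev hlen
    cases word with
    | nil => simp [aWhile_nil, bTok, okFrom]
    | cons c rest =>
      rw [aWhile_cons, bTok_cons, find?_eq_firstGet]
      cases hg : firstGet c with
      | none => simp
      | some s =>
        by_cases hp : s.isPrefixOf (c :: rest)
        · simp only [hp, if_true]
          have hdrop : ((c :: rest).drop s.length).length ≤ n := by
            have hs := firstGet_pos hg
            simp only [List.length_drop, List.length_cons]
            simp only [List.length_cons] at hlen
            omega
          cases ht : bTok ((c :: rest).drop s.length) with
          | none =>
            by_cases he : s = prev
            · simp [he]
            · simp only [if_neg he, ih _ s hdrop, ht, Option.map_none]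
          | some ts =>
            by_cases he : s = prev
            · simp [he, okFrom]
            · simp only [if_neg he, ih _ s hdrop, ht, Option.map_some, okFrom]
        · simp [hp]

lemma bAdjOK_cons₂ (a b : List Char) (r : List (List Char)) :
    bAdjOK (a :: b :: r) = (decide ¬(a = b) && bAdjOK (b :: r)) := by
  simp [bAdjOK]

lemma okFrom_eq_bAdjOK (ts : List (List Char)) : ∀ (prev : List Char),
    okFrom prev ts =
      ((match ts.head? with
        | none => true
        | some s => decide ¬(s = prev)) && bAdjOK ts) := by
  induction ts with
  | nil => intro prev; simp [okFrom, bAdjOK]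
  | cons s rest ih =>
    intro prev
    simp only [okFrom, List.head?]
    by_cases h : s = prev
    · simp [h]
    · rw [if_neg h, ih s]
      cases rest with
      | nil => simp [bAdjOK, h]
      | cons b r =>
        rw [bAdjOK_cons₂]
        simp only [List.head?]
        by_cases hb : b = s
        · subst hb; simp [h]
        · have hb' : ¬(s = b) := fun he => hb he.symm
          simp [h, hb, hb']

lemma bTok_head_ne_nil (word : List Char) (s : List Char) (ts : List (List Char))
    (h : bTok word = some (s :: ts)) : s ≠ [] := by
  cases word with
  | nil => simp [bTok] at h
  | cons c rest =>
    rw [bTok_cons] at h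
    cases hg : firstGet c with
    | none => simp [hg] at h
    | some s' =>
      rw [hg] at h
      by_cases hp : s'.isPrefixOf (c :: rest)
      · simp only [hp, if_true, Option.map_eq_some_iff] at h
        obtain ⟨ts', _, heq⟩ := h
        have : s = s' := by
          injection heq with h1 _
          exact h1.symm
        subst this
        exact firstGet_ne_nil hg
      · simp [hp] at h

-- per-word: A counts the word iff B does
lemma word_eq (word : List Char) :
    aWhile word [] = (match bTok word with
      | none => false
      | some ts => bAdjOK ts) := by
  rw [aWhile_eq_bTok word.length word [] le_rfl]
  cases h : bTok word with
  | none => rfl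
  | some ts =>
    cases ts with
    | nil => simp [okFrom, bAdjOK]
    | cons s rest =>
      have hs := bTok_head_ne_nil word s rest h
      simp only [okFrom_eq_bAdjOK, List.head?]
      simp [hs]

lemma fold_eq (babbling : List String) (acc : Int) :
    babbling.foldl (fun answer word => if aWhile word.toList [] then answer + 1 else answer) acc =
    babbling.foldl
      (fun answer word =>
        match bTok word.toList with
        | none => answer
        | some ts => if bAdjOK ts then answer + 1 else answer)
      acc := by
  induction babbling generalizing acc with
  | nil => rfl
  | cons w ws ih =>
    simp only [List.foldl_cons]
    rw [word_eq w.toList]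
    cases bTok w.toList with
    | none => simp only []; exact ih acc
    | some ts => by_cases h : bAdjOK ts <;> simp only [h, if_true, if_false] <;> apply ih

-- ===== VERDICT (by name: the statement is the Claim_ definition above) =====
theorem solution_spec : Claim_equal_solution := by
  intro babbling _
  show solution babbling = solution_alt babbling
  exact fold_eq babbling 0
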